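-- pv_equiv track=rewrite | github.com/Rousoll/AI-Via | ai/traffic_control.py | get_next_active_idx
-- ===== SOURCE A (Python) =====
-- def get_next_active_idx(signals, current_idx):
--     # Priority: ambulance > fire > police > most cars
--     for priority in ['ambulance', 'fire', 'police']:
--         for idx, signal in enumerate(signals):
--             if priority in signal['vehicles']:
--                 return idx
--     max_cars = max((s['vehicles'].count('car'), idx) for idx, s in enumerate(signals))
--     if max_cars[0] > 0:
--         return max_cars[1]
--     return (current_idx + 1) % len(signals)
-- ===== SOURCE B (Python) =====
-- def get_next_active_idx(signals, current_idx):
--     # Single pass: remember first index per priority type and the best (count, idx) pair.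
--     if not signals:
--         raise ValueError("no signals")
--     amb = fire = pol = None
--     best = None
--     for idx, s in enumerate(signals):
--         vs = s['vehicles']
--         if amb is None and 'ambulance' in vs:
--             amb = idx
--         if fire is None and 'fire' in vs:
--             fire = idx
--         if pol is None and 'police' in vs:
--             pol = idx
--         pair = (vs.count('car'), idx)
--         if best is None or pair > best:
--             best = pair
--     if amb is not None:
--         return amb
--     if fire is not None:
--         return fire
--     if pol is not None:
--         return pol
--     if best[0] > 0:
--         return best[1]
--     return (current_idx + 1) % len(signals)
-- ===== Notes on version B (the rewrite author's own statement) =====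
-- stated objective: alternative
-- what changed: B replaces A's three sequential priority scans plus a separately built (count,idx) list fed to max() by one single pass over the signals that maintains the first index of each priority type and the running best (car_count, idx) pair.
-- outside the precondition, e.g. on get_next_active_idx([{'vehicles': ['ambulance']}, {}], 0): A returns 0, B raises KeyError
import Mathlib
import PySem

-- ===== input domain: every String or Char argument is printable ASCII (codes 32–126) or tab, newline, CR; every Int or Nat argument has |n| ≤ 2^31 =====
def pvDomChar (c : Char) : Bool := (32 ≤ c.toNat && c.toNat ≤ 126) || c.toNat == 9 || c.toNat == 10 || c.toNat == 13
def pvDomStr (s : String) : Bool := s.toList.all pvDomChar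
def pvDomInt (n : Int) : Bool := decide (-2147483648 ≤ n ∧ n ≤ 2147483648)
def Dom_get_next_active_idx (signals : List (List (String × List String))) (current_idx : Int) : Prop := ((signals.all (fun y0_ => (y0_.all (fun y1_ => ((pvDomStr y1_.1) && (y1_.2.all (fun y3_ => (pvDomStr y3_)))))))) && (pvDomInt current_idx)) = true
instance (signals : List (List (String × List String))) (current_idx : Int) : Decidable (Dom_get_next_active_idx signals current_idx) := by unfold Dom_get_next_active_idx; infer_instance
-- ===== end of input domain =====

-- B folds over the signals once, keeping the first index of each priority type and the best
-- (car count, index) pair, instead of A's three sequential priority scans plus a max over a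
-- built list of pairs; return value agrees with A on Pre_ (objective: alternative decomposition).

-- ===== PORT A =====
-- signal['vehicles'] (Pre_ guarantees the key is present, so the default is never used)
def pvVehicles (s : List (String × List String)) : List String :=
  PySem.Dict.getD (PySem.Dict.mk s) "vehicles" []

-- inner 'for idx, signal in enumerate(signals): if priority in signal["vehicles"]: return idx'
def pvFindPri (p : String) : List (List (String × List String)) → Int → Option Int
  | [], _ => none
  | s :: rest, i => if p ∈ pvVehicles s then some i else pvFindPri p rest (i + 1)

-- the generator '(s["vehicles"].count("car"), idx) for idx, s in enumerate(signals)'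
def pvPairs : Int → List (List (String × List String)) → List (Int × Int)
  | _, [] => []
  | i, s :: rest => (((pvVehicles s).count "car" : Int), i) :: pvPairs (i + 1) rest

def get_next_active_idx (signals : List (List (String × List String))) (current_idx : Int) : Int :=
  match pvFindPri "ambulance" signals 0 with
  | some i => i
  | none =>
  match pvFindPri "fire" signals 0 with
  | some i => i
  | none =>
  match pvFindPri "police" signals 0 with
  | some i => i
  | none =>
    match PySem.List.max2? (pvPairs 0 signals) (fun p => p.1) (fun p => p.2) with
    | some m => if m.1 > 0 then m.2 else PySem.Int.mod (current_idx + 1) signals.length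
    | none => 0  -- Python raises ValueError here (empty signals); excluded by Pre_

-- ===== PORT B =====
-- the single loop of Source B; state = (idx, amb, fire, pol, best)
def pvLoop : List (List (String × List String)) → Int → Option Int → Option Int → Option Int →
    Option (Int × Int) → Option Int × Option Int × Option Int × Option (Int × Int)
  | [], _, a, f, p, b => (a, f, p, b)
  | s :: rest, i, a, f, p, b =>
    let vs := pvVehicles s
    let a' := match a with | some x => some x | none => if "ambulance" ∈ vs then some i else none
    let f' := match f with | some x => some x | none => if "fire" ∈ vs then some i else none
    let p' := match p with | some x => some x | none => if "police" ∈ vs then some i else none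
    let c : Int := (vs.count "car" : Int)
    let b' := match b with
      | none => some (c, i)
      | some m => if m.1 < c ∨ (¬ c < m.1 ∧ m.2 < i) then some (c, i) else some m
    pvLoop rest (i + 1) a' f' p' b'

def get_next_active_idx_alt (signals : List (List (String × List String))) (current_idx : Int) : Int :=
  match pvLoop signals 0 none none none none with
  | (some i, _, _, _) => i
  | (none, some i, _, _) => i
  | (none, none, some i, _) => i
  | (none, none, none, some m) =>
      if m.1 > 0 then m.2 else PySem.Int.mod (current_idx + 1) signals.length
  | (none, none, none, none) => 0  -- Source B raises ValueError here (empty signals); excluded by Pre_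

-- ===== PRECONDITION & SPEC =====
-- Pre_ excludes empty signals (A's max() raises ValueError) and signals in which some dict lacks
-- the key 'vehicles' (A raises KeyError there unless an earlier signal carries a priority vehicle;
-- those few returning inputs are excluded too — see the cite).
def Pre_get_next_active_idx (signals : List (List (String × List String))) (current_idx : Int) : Prop :=
  signals ≠ [] ∧ ∀ s ∈ signals, (PySem.Dict.mk s).contains "vehicles" = true
instance (signals : List (List (String × List String))) (current_idx : Int) : Decidable (Pre_get_next_active_idx signals current_idx) := by unfold Pre_get_next_active_idx; infer_instance

def pvWitness_get_next_active_idx : (List (List (String × List String))) × Int :=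
  ([[("vehicles", ["car", "ambulance"])], [("vehicles", [])]], 0)

def Spec_get_next_active_idx (signals : List (List (String × List String))) (current_idx : Int) (out : Int) : Prop := out = get_next_active_idx_alt signals current_idx
instance (signals : List (List (String × List String))) (current_idx : Int) (out : Int) : Decidable (Spec_get_next_active_idx signals current_idx out) := by unfold Spec_get_next_active_idx; infer_instance

-- ===== CLAIM (what is proved, stated in full; the proofs are below) =====
def Claim_equal_get_next_active_idx : Prop := ∀ (signals : List (List (String × List String))) (current_idx : Int), Dom_get_next_active_idx signals current_idx → Pre_get_next_active_idx signals current_idx → Spec_get_next_active_idx signals current_idx (get_next_active_idx signals current_idx)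

-- ===== LEMMAS AND PROOFS =====

theorem pvLoop_amb (l : List (List (String × List String))) : ∀ (i : Int) a f p b,
    (pvLoop l i a f p b).1 =
      (match a with | some x => some x | none => pvFindPri "ambulance" l i) := by
  induction l with
  | nil => intro i a f p b; cases a <;> rfl
  | cons s rest ih =>
    intro i a f p b
    simp only [pvLoop, pvFindPri, ih]
    cases a with
    | some x => simp
    | none => by_cases h : "ambulance" ∈ pvVehicles s <;> simp [h]

theorem pvLoop_fire (l : List (List (String × List String))) : ∀ (i : Int) a f p b,
    (pvLoop l i a f p b).2.1 =
      (match f with | some x => some x | none => pvFindPri "fire" l i) := by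
  induction l with
  | nil => intro i a f p b; cases f <;> rfl
  | cons s rest ih =>
    intro i a f p b
    simp only [pvLoop, pvFindPri, ih]
    cases f with
    | some x => simp
    | none => by_cases h : "fire" ∈ pvVehicles s <;> simp [h]

theorem pvLoop_pol (l : List (List (String × List String))) : ∀ (i : Int) a f p b,
    (pvLoop l i a f p b).2.2.1 =
      (match p with | some x => some x | none => pvFindPri "police" l i) := by
  induction l with
  | nil => intro i a f p b; cases p <;> rfl
  | cons s rest ih =>
    intro i a f p b
    simp only [pvLoop, pvFindPri, ih]
    cases p with
    | some x => simp
    | none => by_cases h : "police" ∈ pvVehicles s <;> simp [h]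

theorem pvLoop_best (l : List (List (String × List String))) : ∀ (i : Int) a f p b,
    (pvLoop l i a f p b).2.2.2 =
      List.foldl
        (fun acc x =>
          match acc with
          | none => some x
          | some m =>
            if (decide (m.1 < x.1) || !decide (x.1 < m.1) && decide (m.2 < x.2)) = true
            then some x else some m)
        b (pvPairs i l) := by
  induction l with
  | nil => intro i a f p b; rfl
  | cons s rest ih =>
    intro i a f p b
    simp only [pvLoop, pvPairs, List.foldl, ih]
    congr 1
    cases b with
    | none => rfl
    | some m =>
      by_cases h1 : m.1 < ((pvVehicles s).count "car" : Int) <;>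
        by_cases h2 : ((pvVehicles s).count "car" : Int) < m.1 <;>
        by_cases h3 : m.2 < i <;>
        simp [h1, h2, h3]

theorem get_next_eq (signals : List (List (String × List String))) (current_idx : Int) :
    get_next_active_idx signals current_idx = get_next_active_idx_alt signals current_idx := by
  unfold get_next_active_idx get_next_active_idx_alt
  rw [show (pvLoop signals 0 none none none none) =
      ((pvLoop signals 0 none none none none).1,
       (pvLoop signals 0 none none none none).2.1,
       (pvLoop signals 0 none none none none).2.2.1,
       (pvLoop signals 0 none none none none).2.2.2) from rfl,
    pvLoop_amb, pvLoop_fire, pvLoop_pol, pvLoop_best]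
  dsimp only
  have hmax : PySem.List.max2? (pvPairs 0 signals) (fun p => p.1) (fun p => p.2) =
      List.foldl
        (fun acc x =>
          match acc with
          | none => some x
          | some m =>
            if (decide (m.1 < x.1) || !decide (x.1 < m.1) && decide (m.2 < x.2)) = true
            then some x else some m)
        none (pvPairs 0 signals) := by
    unfold PySem.List.max2?
    congr 1
    funext acc x
    cases acc <;> rfl
  rw [← hmax]
  cases pvFindPri "ambulance" signals 0 <;>
    cases pvFindPri "fire" signals 0 <;>
      cases pvFindPri "police" signals 0 <;>
        cases PySem.List.max2? (pvPairs 0 signals) (fun p => p.1) (fun p => p.2) <;> rfl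

-- ===== VERDICT (by name: the statement is the Claim_ definition above) =====
theorem get_next_active_idx_spec : Claim_equal_get_next_active_idx := by
  intro signals current_idx _ _
  unfold Spec_get_next_active_idx
  exact get_next_eq signals current_idx
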